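-- pv_equiv track=rewrite | github.com/puhakkaJ/Y1_2019 | r8/word_statistics.py | is_alpha_or_hyphened
-- ===== SOURCE A (Python) =====
-- def is_alpha_or_hyphened(word):
--     alpha_found = False
--     parts = word.split("-")
--     for w in parts:
--         if w.isalpha():
--             alpha_found = True
--         elif not w.isdigit():
--             return False
--     return alpha_found
-- ===== SOURCE B (Python) =====
-- def is_alpha_or_hyphened(word):
--     # Single character-level scan: no list of parts is ever built.
--     # state: 0 = current part empty so far, 1 = all-alpha so far, 2 = all-digit so far
--     alpha_found = False
--     state = 0
--     for c in word:
--         if c == "-":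
--             if state == 0:
--                 return False
--             if state == 1:
--                 alpha_found = True
--             state = 0
--         elif c.isalpha():
--             if state == 2:
--                 return False
--             state = 1
--         elif c.isdigit():
--             if state == 1:
--                 return False
--             state = 2
--         else:
--             return False
--     if state == 0:
--         return False
--     if state == 1:
--         alpha_found = True
--     return alpha_found
-- ===== Notes on version B (the rewrite author's own statement) =====
-- stated objective: alternative
-- what changed: Replaced split-then-validate-parts (build the list of hyphen-separated parts, then loop over parts calling isalpha/isdigit on each whole part) by a single character-level finite-state machine over the raw string that never materialises the parts, tracking per-part state (empty/alpha/digit) across hyphens.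
import Mathlib
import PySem

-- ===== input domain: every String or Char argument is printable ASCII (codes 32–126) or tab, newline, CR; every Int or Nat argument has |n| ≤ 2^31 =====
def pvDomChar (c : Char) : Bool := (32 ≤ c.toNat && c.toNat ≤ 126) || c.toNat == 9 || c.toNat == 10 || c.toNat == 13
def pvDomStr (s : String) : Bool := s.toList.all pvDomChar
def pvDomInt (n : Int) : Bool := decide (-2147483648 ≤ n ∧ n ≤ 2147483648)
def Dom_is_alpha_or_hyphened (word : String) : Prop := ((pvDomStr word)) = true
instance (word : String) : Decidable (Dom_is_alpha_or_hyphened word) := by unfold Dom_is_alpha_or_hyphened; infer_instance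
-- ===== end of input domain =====

-- B replaces A's split-into-parts pass by a character-level state machine that never builds the parts; objective: alternative (same cost, different data traversal).


-- ===== PORT A =====
def pvA_loop : List String → Bool → Bool
  | [], acc => acc
  | w :: rest, acc =>
    if PySem.Str.strIsalpha w then pvA_loop rest true
    else if !(PySem.Str.strIsdigit w) then false
    else pvA_loop rest acc

-- sep "-" ≠ "", so split? is always some; exact port of word.split("-")
def is_alpha_or_hyphened (word : String) : Bool :=
  pvA_loop ((PySem.Str.split? word "-").getD []) false

-- ===== PORT B =====
-- port of Source B's loop: state 0 = current part empty, 1 = all-alpha so far, 2 = all-digit so far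
def pvB_loop : List Char → Nat → Bool → Bool
  | [], state, alpha_found =>
    if state == 0 then false
    else if state == 1 then true
    else alpha_found
  | c :: rest, state, alpha_found =>
    if c == '-' then
      if state == 0 then false
      else pvB_loop rest 0 (alpha_found || state == 1)
    else if PySem.Chars.isalpha c then
      if state == 2 then false
      else pvB_loop rest 1 alpha_found
    else if PySem.Chars.isdigit c then
      if state == 1 then false
      else pvB_loop rest 2 alpha_found
    else false

def is_alpha_or_hyphened_alt (word : String) : Bool :=
  pvB_loop word.toList 0 false

-- ===== PRECONDITION & SPEC =====
def Spec_is_alpha_or_hyphened (word : String) (out : Bool) : Prop := out = is_alpha_or_hyphened_alt word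
instance (word : String) (out : Bool) : Decidable (Spec_is_alpha_or_hyphened word out) := by unfold Spec_is_alpha_or_hyphened; infer_instance

-- ===== CLAIM (what is proved; proofs below) =====
def Claim_equal_is_alpha_or_hyphened : Prop := ∀ (word : String), Dom_is_alpha_or_hyphened word → Spec_is_alpha_or_hyphened word (is_alpha_or_hyphened word)

-- ===== LEMMAS AND PROOFS =====

-- clean structural recursion equal to PySem.Chars.splitOn · ['-']
def mySplit : List Char → List (List Char)
  | [] => [[]]
  | c :: cs => if c = '-' then [] :: mySplit cs
               else (c :: (mySplit cs).headD []) :: (mySplit cs).tail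

lemma mySplit_ne_nil (cs : List Char) : mySplit cs ≠ [] := by
  cases cs with
  | nil => simp [mySplit]
  | cons c cs => by_cases h : c = '-' <;> simp [mySplit, h]

lemma go_spec (l : List Char) : ∀ (fuel : Nat) (cur : List Char) (acc : List (List Char)),
    l.length ≤ fuel →
    PySem.Chars.splitOn.go ['-'] fuel l cur acc =
      acc.reverse ++ (cur.reverse ++ (mySplit l).headD []) :: (mySplit l).tail := by
  induction l with
  | nil =>
    intro fuel cur acc _
    cases fuel <;> simp [PySem.Chars.splitOn.go, mySplit]
  | cons c rest ih =>
    intro fuel cur acc hle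
    rcases hE : mySplit rest with _ | ⟨h', t'⟩
    · exact absurd hE (mySplit_ne_nil rest)
    cases fuel with
    | zero => simp at hle
    | succ fuel =>
      rw [PySem.Chars.splitOn.go]
      simp only [List.isPrefixOf]
      by_cases hc : c = '-'
      · subst hc
        simp only [beq_self_eq_true, Bool.and_true, reduceIte, List.length_cons,
          List.length_nil, List.drop_succ_cons, List.drop_zero]
        rw [ih fuel [] (cur.reverse :: acc) (by simpa using Nat.succ_le_succ_iff.mp hle)]
        simp [mySplit, hE]
      · rw [if_neg (by simp; exact fun h => hc h.symm)]
        rw [ih fuel (c :: cur) acc (by simpa using Nat.succ_le_succ_iff.mp hle)]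
        simp [mySplit, hc, hE]

lemma splitOn_eq_mySplit (cs : List Char) :
    PySem.Chars.splitOn cs ['-'] = mySplit cs := by
  unfold PySem.Chars.splitOn
  rw [go_spec cs (cs.length + 1) [] [] (by omega)]
  rcases hE : mySplit cs with _ | ⟨h', t'⟩
  · exact absurd hE (mySplit_ne_nil cs)
  · simp

lemma pvA_loop_eq (parts : List String) (acc : Bool) :
    pvA_loop parts acc =
      ((parts.all fun p => PySem.Str.strIsalpha p || PySem.Str.strIsdigit p) &&
       (acc || parts.any fun p => PySem.Str.strIsalpha p)) := by
  induction parts generalizing acc with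
  | nil => simp [pvA_loop]
  | cons w rest ih =>
    cases acc <;>
      by_cases ha : PySem.Chars.strIsalpha w.toList <;>
        by_cases hd : PySem.Chars.strIsdigit w.toList <;>
          simp [pvA_loop, PySem.Str.strIsalpha, PySem.Str.strIsdigit, ha, hd, ih]

lemma alpha_not_digit (c : Char) (h : PySem.Chars.isalpha c = true) :
    PySem.Chars.isdigit c = false := by
  simp [PySem.Chars.isalpha, PySem.Chars.isupper, PySem.Chars.islower, Char.le_def,
    UInt32.le_iff_toNat_le] at h
  simp [PySem.Chars.isdigit, Char.le_def, UInt32.le_iff_toNat_le]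
  intro h1
  rcases h with ⟨a, b⟩ | ⟨a, b⟩ <;> omega

-- how a part begun in state st and continued by chars h validates / counts as alpha
def contOK (st : Nat) (h : List Char) : Bool :=
  if st = 0 then PySem.Chars.strIsalpha h || PySem.Chars.strIsdigit h
  else if st = 1 then h.all PySem.Chars.isalpha
  else h.all PySem.Chars.isdigit

def contAl (st : Nat) (h : List Char) : Bool :=
  if st = 0 then PySem.Chars.strIsalpha h
  else if st = 1 then h.all PySem.Chars.isalpha
  else false

lemma pvB_spec (cs : List Char) : ∀ (st : Nat) (alpha : Bool), st ≤ 2 →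
    pvB_loop cs st alpha =
      (contOK st ((mySplit cs).headD []) &&
       ((mySplit cs).tail.all fun p => PySem.Chars.strIsalpha p || PySem.Chars.strIsdigit p) &&
       (alpha || contAl st ((mySplit cs).headD []) ||
        (mySplit cs).tail.any PySem.Chars.strIsalpha)) := by
  induction cs with
  | nil =>
    intro st alpha hst
    interval_cases st <;>
      cases alpha <;>
        simp [pvB_loop, mySplit, contOK, contAl, PySem.Chars.strIsalpha, PySem.Chars.strIsdigit]
  | cons c cs ih =>
    intro st alpha hst
    rcases hE : mySplit cs with _ | ⟨h', t'⟩
    · exact absurd hE (mySplit_ne_nil cs)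
    simp only [hE] at ih
    by_cases hc : c = '-'
    · subst hc
      interval_cases st <;>
        simp [pvB_loop, mySplit, hE, contOK, contAl, ih 0 _ (by omega), Bool.or_assoc,
          PySem.Chars.strIsalpha, PySem.Chars.strIsdigit]
    · by_cases ha : PySem.Chars.isalpha c
      · have hd := alpha_not_digit c ha
        interval_cases st <;>
          simp [pvB_loop, mySplit, hc, hE, contOK, contAl, ha, hd, ih 1 _ (by omega),
            PySem.Chars.strIsalpha, PySem.Chars.strIsdigit]
      · by_cases hd : PySem.Chars.isdigit c
        · interval_cases st <;>
            simp [pvB_loop, mySplit, hc, hE, contOK, contAl, ha, hd, ih 2 _ (by omega),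
              PySem.Chars.strIsalpha, PySem.Chars.strIsdigit]
        · interval_cases st <;>
            simp [pvB_loop, mySplit, hc, hE, contOK, contAl, ha, hd,
              PySem.Chars.strIsalpha, PySem.Chars.strIsdigit]

-- ===== VERDICT =====
theorem is_alpha_or_hyphened_spec : Claim_equal_is_alpha_or_hyphened := by
  intro word _
  unfold Spec_is_alpha_or_hyphened is_alpha_or_hyphened is_alpha_or_hyphened_alt
  have hsplit : PySem.Str.split? word "-" ≠ none := by
    simp [PySem.Str.split?, PySem.Chars.split?]
  rcases hps : PySem.Str.split? word "-" with _ | ps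
  · exact absurd hps hsplit
  have hmap : ps.map String.toList = mySplit word.toList := by
    have := PySem.Str.split?_map word "-"
    rw [hps] at this
    simpa [PySem.Chars.split?, splitOn_eq_mySplit] using this
  rw [pvB_spec word.toList 0 false (by omega), pvA_loop_eq]
  rcases hE : mySplit word.toList with _ | ⟨h', t'⟩
  · exact absurd hE (mySplit_ne_nil _)
  rw [hE] at hmap
  simp only [Option.getD_some]
  rw [show (ps.all fun p => PySem.Str.strIsalpha p || PySem.Str.strIsdigit p)
        = ((ps.map String.toList).all fun p => PySem.Chars.strIsalpha p || PySem.Chars.strIsdigit p) by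
      simp [List.all_map, Function.comp_def, PySem.Str.strIsalpha, PySem.Str.strIsdigit],
    show (ps.any fun p => PySem.Str.strIsalpha p)
        = ((ps.map String.toList).any fun p => PySem.Chars.strIsalpha p) by
      simp [List.any_map, Function.comp_def, PySem.Str.strIsalpha],
    hmap]
  simp [contOK, contAl, Bool.and_assoc]
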